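-- pv_equiv track=rewrite | github.com/maximillian-dolan/atlas_analysis | hzz/counter/hzz_counter.py | split_dictionary
-- ===== SOURCE A (Python) =====
-- def add_dictionaries(dict1, dict2):
--     result = {}
--     for key in dict1.keys():
--         if key in dict2:
--             if isinstance(dict1[key], dict) and isinstance(dict2[key], dict):
--                 # Recursively call for nested dictionaries
--                 result[key] = add_dictionaries(dict1[key], dict2[key])
--             else:
--                 # Add values if they are not nested dictionaries
--                 result[key] = dict1[key] + dict2[key]
--
--     return result
--
-- def split_dictionary(original_dict, n):
--     output_dicts = [{} for _ in range(n+1)]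
--     zeros, ones = {},{}
--
--     for category, sub_dict in original_dict.items():
--         for key, value in sub_dict.items():
--
--             # Splitting the value into n parts
--             split_values = [value // n] * n
--             remaining = value % n
--
--             # Distributing the remainder among the first 'remaining' dictionaries
--             for i in range(remaining):
--                 split_values[i] += 1
--
--             # Set initial dictionary of start points and create dictionary of 1s
--             zeros.setdefault(category, {})[key] = 0
--             ones.setdefault(category, {})[key] = 1
--
--             output_dicts[0] = zeros
--
--             # Assigning split values to output dictionaries
--             for i in range(1,n+1):
--                 output_dicts[i].setdefault(category, {})[key] = split_values[i-1]
--
--     # Make dictionaries to be cumulative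
--     for i in range(1,n+1):
--         output_dicts[i] = add_dictionaries(output_dicts[i-1],output_dicts[i])
--
--     # Create start and end value dictionaries
--     start_dicts = output_dicts[:-1]
--     end_dicts = output_dicts[1:]
--
--     # Make start values 1 more than previous end values
--     for i in range(1,n):
--         start_dicts[i] = add_dictionaries(start_dicts[i], ones)
--
--     # Final validation check to ensure all dictionaries add up to original
--     if output_dicts[n] == original_dict:
--         return start_dicts, end_dicts
--
--     else:
--         raise ValueError('End verification failed')
-- ===== SOURCE B (Python) =====
-- def split_dictionary(original_dict, n):
--     # One pass: per key compute the n parts and their prefix sums directly,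
--     # filling all n start dicts and n end dicts immediately.
--     starts = [{} for _ in range(n)]
--     ends = [{} for _ in range(n)]
--     for category, sub_dict in original_dict.items():
--         for key, value in sub_dict.items():
--             q, r = divmod(value, n)
--             cum = 0
--             for j in range(n):
--                 starts[j].setdefault(category, {})[key] = 0 if j == 0 else cum + 1
--                 cum += q + (1 if j < r else 0)
--                 ends[j].setdefault(category, {})[key] = cum
--     return starts, ends
-- ===== Notes on version B (the rewrite author's own statement) =====
-- stated objective: simpler
-- what changed: B fills all n start dicts and n end dicts directly in one pass by computing each value's per-bucket prefix sums, instead of A's n+1 intermediate dicts made cumulative by repeated add_dictionaries merge passes, list slicing, a 'ones' dict offset pass and a final verification pass.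
import Mathlib
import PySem

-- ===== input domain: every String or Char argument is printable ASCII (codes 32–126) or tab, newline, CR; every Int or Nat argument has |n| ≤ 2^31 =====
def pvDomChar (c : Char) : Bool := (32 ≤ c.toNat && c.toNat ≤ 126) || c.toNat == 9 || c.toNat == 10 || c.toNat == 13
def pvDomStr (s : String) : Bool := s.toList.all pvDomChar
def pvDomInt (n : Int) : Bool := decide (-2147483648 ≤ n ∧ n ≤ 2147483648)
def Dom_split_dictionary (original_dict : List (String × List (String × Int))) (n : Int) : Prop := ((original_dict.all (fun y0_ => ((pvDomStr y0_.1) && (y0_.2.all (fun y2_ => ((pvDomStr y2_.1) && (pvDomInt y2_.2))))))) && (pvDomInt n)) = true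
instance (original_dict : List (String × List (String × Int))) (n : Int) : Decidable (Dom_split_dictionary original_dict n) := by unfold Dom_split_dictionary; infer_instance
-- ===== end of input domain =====

-- B replaces A's n+1 intermediate dicts, merge passes, slices and offset pass by one
-- direct prefix-sum pass per key (objective: simpler).  Equality is about return values;
-- neither implementation mutates its argument.

abbrev pvDI := PySem.Dict String Int
abbrev pvDO := PySem.Dict String pvDI

-- d.setdefault(category, {})[key] = w   (shared idiom of both Pythons)
def pvIns (cat key : String) (w : Int) (d : pvDO) : pvDO :=
  d.insert cat ((d.getD cat PySem.Dict.empty).insert key w)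

def pvToPlain (d : pvDO) : List (String × List (String × Int)) :=
  d.items.map (fun p => (p.1, p.2.items))

-- ===== PORT A =====
-- add_dictionaries, at the two (fixed-depth) types A ever uses it at:
-- inner level: int values are added
def pvAddInner (d1 d2 : pvDI) : pvDI :=
  d1.items.foldl (fun r kv =>
    if d2.contains kv.1 then r.insert kv.1 (kv.2 + d2.getD kv.1 0) else r) PySem.Dict.empty
-- outer level: both values are dicts, recursive call = pvAddInner
def pvAddOuter (d1 d2 : pvDO) : pvDO :=
  d1.items.foldl (fun r kv =>
    if d2.contains kv.1 then r.insert kv.1 (pvAddInner kv.2 (d2.getD kv.1 PySem.Dict.empty)) else r) PySem.Dict.empty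

-- Python's dict == (order-insensitive, key-by-key), at the two types used
def pvDictEqI (a b : pvDI) : Bool :=
  a.size == b.size && a.items.all (fun kv => b.get? kv.1 == some kv.2)
def pvDictEqO (a b : pvDO) : Bool :=
  a.size == b.size && a.items.all (fun kv =>
    match b.get? kv.1 with | some w => pvDictEqI kv.2 w | none => false)

-- split_values = [value // n] * n; remaining = value % n; for i in range(remaining): split_values[i] += 1
def pvSplitVals (n value : Int) : List Int :=
  (PySem.List.pyRange 0 (PySem.Int.mod value n) 1).foldl
    (fun sv i => match sv[i.toNat]? with
      | some x => sv.set i.toNat (x + 1)   -- in range whenever Python does not raise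
      | none => sv)
    (List.replicate n.toNat (PySem.Int.floordiv value n))

-- the body of A's inner 'for key, value in sub_dict.items()' loop, acting on (zeros, ones, output_dicts)
def pvStepKey (n : Int) (category key : String) (value : Int)
    (st : pvDO × pvDO × List pvDO) : pvDO × pvDO × List pvDO :=
  let split_values := pvSplitVals n value
  let zeros := pvIns category key 0 st.1
  let ones := pvIns category key 1 st.2.1
  let outs := st.2.2.set 0 zeros
  let outs := (PySem.List.pyRange 1 (n + 1) 1).foldl
    (fun o i => o.set i.toNat (pvIns category key (split_values.getD (i.toNat - 1) 0)
      (o.getD i.toNat PySem.Dict.empty))) outs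
  (zeros, ones, outs)

def split_dictionary (original_dict : List (String × List (String × Int))) (n : Int) :
    (List (List (String × List (String × Int)))) × (List (List (String × List (String × Int)))) :=
  let output_dicts : List pvDO := (PySem.List.pyRange 0 (n + 1) 1).map (fun _ => PySem.Dict.empty)
  let st := original_dict.foldl
    (fun st cs => cs.2.foldl (fun st kv => pvStepKey n cs.1 kv.1 kv.2 st) st)
    (PySem.Dict.empty, PySem.Dict.empty, output_dicts)
  let ones := st.2.1
  let output_dicts := st.2.2
  -- for i in range(1, n+1): output_dicts[i] = add_dictionaries(output_dicts[i-1], output_dicts[i])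
  let output_dicts := (PySem.List.pyRange 1 (n + 1) 1).foldl
    (fun o i => o.set i.toNat
      (pvAddOuter (o.getD (i.toNat - 1) PySem.Dict.empty) (o.getD i.toNat PySem.Dict.empty)))
    output_dicts
  let start_dicts := PySem.List.slice output_dicts none (some (-1))
  let end_dicts := PySem.List.slice output_dicts (some 1) none
  -- for i in range(1, n): start_dicts[i] = add_dictionaries(start_dicts[i], ones)
  let start_dicts := (PySem.List.pyRange 1 n 1).foldl
    (fun s i => s.set i.toNat (pvAddOuter (s.getD i.toNat PySem.Dict.empty) ones)) start_dicts
  if pvDictEqO (output_dicts.getD n.toNat PySem.Dict.empty)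
      (PySem.Dict.mk (original_dict.map (fun c => (c.1, PySem.Dict.mk c.2)))) then
    (start_dicts.map pvToPlain, end_dicts.map pvToPlain)
  else ([], [])   -- Python: raise ValueError (outside Pre_)

-- ===== PORT B =====
-- body of B's inner loop: one pass over the n buckets of a single (category, key, value)
def pvStepKeyB (n : Int) (category key : String) (value : Int)
    (st : List pvDO × List pvDO) : List pvDO × List pvDO :=
  let q := PySem.Int.floordiv value n   -- q, r = divmod(value, n); n ≠ 0 whenever this runs inside Pre_
  let r := PySem.Int.mod value n
  let t := (PySem.List.pyRange 0 n 1).foldl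
    (fun (acc : List pvDO × List pvDO × Int) j =>
      let starts := acc.1.set j.toNat
        (pvIns category key (if j = 0 then 0 else acc.2.2 + 1) (acc.1.getD j.toNat PySem.Dict.empty))
      let cum := acc.2.2 + q + (if j < r then 1 else 0)
      let ends := acc.2.1.set j.toNat
        (pvIns category key cum (acc.2.1.getD j.toNat PySem.Dict.empty))
      (starts, ends, cum))
    (st.1, st.2, (0 : Int))
  (t.1, t.2.1)

def split_dictionary_alt (original_dict : List (String × List (String × Int))) (n : Int) :
    (List (List (String × List (String × Int)))) × (List (List (String × List (String × Int)))) :=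
  let starts : List pvDO := (PySem.List.pyRange 0 n 1).map (fun _ => PySem.Dict.empty)
  let ends : List pvDO := (PySem.List.pyRange 0 n 1).map (fun _ => PySem.Dict.empty)
  let st := original_dict.foldl
    (fun st cs => cs.2.foldl (fun st kv => pvStepKeyB n cs.1 kv.1 kv.2 st) st)
    (starts, ends)
  (st.1.map pvToPlain, st.2.map pvToPlain)

-- ===== PRECONDITION & SPEC =====
-- Pre_ excludes: n < 0 and n = 0 with a non-empty input (A raises IndexError resp.
-- ZeroDivisionError/ValueError), inputs containing an empty sub-dict (A's final
-- verification raises ValueError), and association lists with duplicate category or key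
-- names, which do not represent a Python dict (both programs, fed the collapsed dict, agree).
def Pre_split_dictionary (original_dict : List (String × List (String × Int))) (n : Int) : Prop :=
  ((original_dict.map Prod.fst).Nodup ∧
    ∀ c ∈ original_dict, c.2 ≠ [] ∧ (c.2.map Prod.fst).Nodup) ∧
  (1 ≤ n ∨ (original_dict = [] ∧ 0 ≤ n))
instance (original_dict : List (String × List (String × Int))) (n : Int) :
    Decidable (Pre_split_dictionary original_dict n) := by
  unfold Pre_split_dictionary; infer_instance

def pvWitness_split_dictionary : (List (String × List (String × Int))) × Int :=
  ([("a", [("x", 7), ("y", 3)]), ("b", [("z", 5)])], 3)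

def Spec_split_dictionary (original_dict : List (String × List (String × Int))) (n : Int)
    (out : (List (List (String × List (String × Int)))) × (List (List (String × List (String × Int))))) : Prop :=
  out = split_dictionary_alt original_dict n
instance (original_dict : List (String × List (String × Int))) (n : Int)
    (out : (List (List (String × List (String × Int)))) × (List (List (String × List (String × Int))))) :
    Decidable (Spec_split_dictionary original_dict n out) := by
  unfold Spec_split_dictionary
  letI h1 : DecidableEq (String × Int) := inferInstance
  letI h2 : DecidableEq (List (String × Int)) := inferInstance
  letI h3 : DecidableEq (String × List (String × Int)) := inferInstance
  letI h4 : DecidableEq (List (String × List (String × Int))) := inferInstance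
  letI h5 : DecidableEq (List (List (String × List (String × Int)))) := inferInstance
  exact instDecidableEqProd _ _

-- ===== CLAIM (what is proved, stated in full; the proofs are below) =====
def Claim_equal_split_dictionary : Prop := ∀ (original_dict : List (String × List (String × Int))) (n : Int), Dom_split_dictionary original_dict n → Pre_split_dictionary original_dict n → Spec_split_dictionary original_dict n (split_dictionary original_dict n)

-- ===== LEMMAS AND PROOFS =====

-- canonical shapes: every dict either program builds maps each key of the input to f(value)
def mapI (f : Int → Int) (sub : List (String × Int)) : List (String × Int) :=
  sub.map (fun kv => (kv.1, f kv.2))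
def mapL (f : Int → Int) (orig : List (String × List (String × Int))) : List (String × pvDI) :=
  orig.map (fun c => (c.1, PySem.Dict.mk (mapI f c.2)))
def mO (f : Int → Int) (orig : List (String × List (String × Int))) : pvDO :=
  PySem.Dict.mk (mapL f orig)

-- the j-th part of value and its prefix sums
def svF (n : Int) (j : Nat) (v : Int) : Int :=
  PySem.Int.floordiv v n + (if (j : Int) < PySem.Int.mod v n then 1 else 0)
def cumF (n : Int) : Nat → Int → Int
  | 0, _ => 0
  | j + 1, v => cumF n j v + svF n j v

theorem keys_mapI (f : Int → Int) (sub : List (String × Int)) :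
    (mapI f sub).map Prod.fst = sub.map Prod.fst := by
  simp [mapI]
theorem keys_mapL (f : Int → Int) (orig : List (String × List (String × Int))) :
    (mapL f orig).map Prod.fst = orig.map Prod.fst := by
  simp [mapL]

theorem contains_mk_false {ν : Type} (L : List (String × ν)) (c : String)
    (h : c ∉ L.map Prod.fst) : (PySem.Dict.mk L).contains c = false := by
  simp only [PySem.Dict.contains, PySem.Dict.items, List.any_eq_false]
  intro p hp
  simp only [beq_iff_eq]
  exact fun hc => h (List.mem_map.mpr ⟨p, hp, hc⟩)

theorem contains_mk_true {ν : Type} (L : List (String × ν)) (c : String)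
    (h : c ∈ L.map Prod.fst) : (PySem.Dict.mk L).contains c = true := by
  simp only [PySem.Dict.contains, PySem.Dict.items, List.any_eq_true]
  rcases List.mem_map.mp h with ⟨p, hp, hc⟩
  exact ⟨p, hp, by simp [hc]⟩

theorem get?_mk_append_last {ν : Type} (L : List (String × ν)) (c : String) (x : ν)
    (h : c ∉ L.map Prod.fst) : (PySem.Dict.mk (L ++ [(c, x)])).get? c = some x := by
  simp only [PySem.Dict.get?, PySem.Dict.items, List.find?_append]
  have hL : L.find? (fun p => p.1 == c) = none := by
    apply List.find?_eq_none.mpr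
    intro p hp
    simp only [beq_iff_eq]
    exact fun hc => h (List.mem_map.mpr ⟨p, hp, hc⟩)
  simp [hL]

theorem getD_mk_append_last {ν : Type} (L : List (String × ν)) (c : String) (x d : ν)
    (h : c ∉ L.map Prod.fst) : (PySem.Dict.mk (L ++ [(c, x)])).getD c d = x := by
  simp [PySem.Dict.getD, get?_mk_append_last L c x h]

theorem insert_mk_fresh {ν : Type} (L : List (String × ν)) (c : String) (v : ν)
    (h : c ∉ L.map Prod.fst) :
    (PySem.Dict.mk L).insert c v = PySem.Dict.mk (L ++ [(c, v)]) := by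
  simp [PySem.Dict.insert, contains_mk_false L c h]

theorem getD_mk_fresh {ν : Type} (L : List (String × ν)) (c : String) (d : ν)
    (h : c ∉ L.map Prod.fst) : (PySem.Dict.mk L).getD c d = d := by
  apply PySem.Dict.getD_of_not_contains
  exact contains_mk_false L c h

theorem insert_mk_append_last {ν : Type} (L : List (String × ν)) (c : String) (x v : ν)
    (h : c ∉ L.map Prod.fst) :
    (PySem.Dict.mk (L ++ [(c, x)])).insert c v = PySem.Dict.mk (L ++ [(c, v)]) := by
  have hc : (PySem.Dict.mk (L ++ [(c, x)])).contains c = true := by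
    apply contains_mk_true
    simp
  simp only [PySem.Dict.insert, hc, if_true]
  congr 1
  show (L ++ [(c, x)]).map _ = _
  rw [List.map_append]
  congr 1
  · conv_rhs => rw [show L = L.map id from (List.map_id L).symm]
    apply List.map_congr_left
    intro p hp
    have : p.1 ≠ c := fun hcc => h (List.mem_map.mpr ⟨p, hp, hcc⟩)
    simp [this]
  · simp

theorem pvIns_fresh (M : List (String × pvDI)) (cat k : String) (w : Int)
    (h : cat ∉ M.map Prod.fst) :
    pvIns cat k w (PySem.Dict.mk M) = PySem.Dict.mk (M ++ [(cat, PySem.Dict.mk [(k, w)])]) := by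
  unfold pvIns
  rw [getD_mk_fresh M cat _ h]
  have h2 : (PySem.Dict.empty : pvDI).insert k w = PySem.Dict.mk [(k, w)] := by
    have := insert_mk_fresh ([] : List (String × Int)) k w (by simp)
    simpa using this
  rw [h2, insert_mk_fresh M cat _ h]

theorem pvIns_last (L : List (String × pvDI)) (done : List (String × Int))
    (cat k : String) (w : Int) (hc : cat ∉ L.map Prod.fst) (hk : k ∉ done.map Prod.fst) :
    pvIns cat k w (PySem.Dict.mk (L ++ [(cat, PySem.Dict.mk done)])) =
      PySem.Dict.mk (L ++ [(cat, PySem.Dict.mk (done ++ [(k, w)]))]) := by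
  unfold pvIns
  rw [getD_mk_append_last L cat _ _ hc, insert_mk_fresh done k w hk,
    insert_mk_append_last L cat _ _ hc]


-- ---- fold-over-range set/update machinery ----

theorem set_map_range {α : Type} (D : Nat → α) (m j : Nat) (y : α) (hj : j < m) :
    ((List.range m).map D).set j y = (List.range m).map (fun i => if i = j then y else D i) := by
  apply List.ext_getElem?
  intro i
  by_cases him : i < m
  · rw [List.getElem?_set]
    simp only [List.getElem?_map, List.getElem?_range, him, List.length_map, List.length_range]
    by_cases hij : j = i
    · subst hij; simp [hj]
    · simp [hij, Ne.symm hij, him]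
  · have h1 : ((List.range m).map D).length ≤ i := by
      simp only [List.length_map, List.length_range]; omega
    have h2 : ((List.range m).map (fun i => if i = j then y else D i)).length ≤ i := by
      simp only [List.length_map, List.length_range]; omega
    rw [List.getElem?_eq_none (by simpa using h1), List.getElem?_eq_none (by simpa using h2)]

theorem setRangeAux {α : Type} (g : Nat → α → α) (x d : α) (M : Nat) (D : Nat → α) :
    ∀ m, m ≤ M →
      (List.range m).foldl (fun o k => o.set (k + 1) (g (k + 1) (o.getD (k + 1) d)))
        (x :: (List.range M).map D)
      = x :: (List.range M).map (fun j => if j + 1 ≤ m then g (j + 1) (D j) else D j)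
  | 0, _ => by simp
  | (m + 1), hm => by
    rw [List.range_succ, List.foldl_append, setRangeAux g x d M D m (by omega)]
    simp only [List.foldl_cons, List.foldl_nil, List.getD_cons_succ, List.set_cons_succ]
    rw [PySem.List.getD_map_range _ M m d (by omega)]
    simp only [show ¬ (m + 1 ≤ m) from by omega, if_false]
    rw [set_map_range _ M m _ (by omega)]
    congr 1
    apply List.map_congr_left
    intro j hj
    simp only [List.mem_range] at hj
    by_cases hjm : j = m
    · subst hjm; simp
    · have h1 : (j + 1 ≤ m + 1) = (j + 1 ≤ m) := by
        apply propext; omega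
      simp [hjm, h1]

theorem foldl_pyRange_set {α : Type} (g : Nat → α → α) (x d : α) (m M : Nat) (D : Nat → α)
    (hm : m ≤ M) :
    (PySem.List.pyRange 1 (1 + (m : Int)) 1).foldl
        (fun o i => o.set i.toNat (g i.toNat (o.getD i.toNat d)))
        (x :: (List.range M).map D)
      = x :: (List.range M).map (fun j => if j + 1 ≤ m then g (j + 1) (D j) else D j) := by
  rw [PySem.List.pyRange_one]
  have h1 : ((1 : Int) + m - 1).toNat = m := by omega
  rw [h1, List.foldl_map]
  have h2 : ∀ k : Nat, ((1 : Int) + (k : Int)).toNat = k + 1 := fun k => by omega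
  simp only [h2]
  exact setRangeAux g x d M D m hm

-- ---- split_values characterisation ----

theorem splitVals_aux (q : Int) (n' : Nat) :
    ∀ t, t ≤ n' →
      (List.range t).foldl
        (fun (sv : List Int) k => match sv[k]? with | some x => sv.set k (x + 1) | none => sv)
        (List.replicate n' q)
      = (List.range n').map (fun j => if j < t then q + 1 else q)
  | 0, _ => by
    simp only [List.range_zero, List.foldl_nil, Nat.not_lt_zero, if_false]
    rw [show (fun (j : Nat) => q) = Function.const Nat q from rfl, List.map_const,
      List.length_range]
  | (t + 1), ht => by
    rw [List.range_succ, List.foldl_append, splitVals_aux q n' t (by omega)]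
    simp only [List.foldl_cons, List.foldl_nil]
    have hget : ((List.range n').map (fun j => if j < t then q + 1 else q))[t]? =
        some (if t < t then q + 1 else q) := by
      simp [List.getElem?_map, List.getElem?_range, show t < n' from by omega]
    rw [hget]
    simp only [lt_irrefl, if_false]
    rw [set_map_range _ n' t _ (by omega)]
    apply List.map_congr_left
    intro j hj
    simp only [List.mem_range] at hj
    by_cases hjt : j = t
    · subst hjt; simp
    · have h1 : (j < t + 1) = (j < t) := by apply propext; omega
      simp [hjt, h1]

theorem mod_bounds (n v : Int) (hn : 1 ≤ n) :
    0 ≤ PySem.Int.mod v n ∧ PySem.Int.mod v n < n := by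
  rw [PySem.Int.mod_eq_emod_of_pos (by omega)]
  exact ⟨Int.emod_nonneg v (by omega), Int.emod_lt_of_pos v (by omega)⟩

theorem splitVals_eq (n v : Int) (hn : 1 ≤ n) :
    pvSplitVals n v = (List.range n.toNat).map (fun j => svF n j v) := by
  obtain ⟨hr0, hrn⟩ := mod_bounds n v hn
  unfold pvSplitVals
  rw [PySem.List.pyRange_one]
  have h1 : ∀ k : Nat, (((0 : Int) + (k : Int))).toNat = k := fun k => by omega
  rw [List.foldl_map]
  simp only [h1]
  have h2 : (PySem.Int.mod v n - 0).toNat ≤ n.toNat := by omega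
  rw [splitVals_aux (PySem.Int.floordiv v n) n.toNat _ h2]
  apply List.map_congr_left
  intro j hj
  simp only [List.mem_range] at hj
  unfold svF
  by_cases hjr : j < (PySem.Int.mod v n - 0).toNat
  · have : (j : Int) < PySem.Int.mod v n := by omega
    simp [hjr, this]
  · have : ¬ ((j : Int) < PySem.Int.mod v n) := by omega
    simp [hjr, this]

-- ---- the effect of one (category, key, value) on A's loop state ----

theorem stepKeyA_shape (n : Int) (hn : 1 ≤ n) (cat k : String) (v : Int)
    (z o h0 : pvDO) (D : Nat → pvDO) :
    pvStepKey n cat k v (z, o, h0 :: (List.range n.toNat).map D) =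
      (pvIns cat k 0 z, pvIns cat k 1 o,
        pvIns cat k 0 z :: (List.range n.toNat).map (fun j => pvIns cat k (svF n j v) (D j))) := by
  unfold pvStepKey
  dsimp only
  rw [List.set_cons_zero]
  have hb : (n + 1 : Int) = 1 + (n.toNat : Int) := by omega
  rw [hb, foldl_pyRange_set (fun j d => pvIns cat k ((pvSplitVals n v).getD (j - 1) 0) d)
    (pvIns cat k 0 z) PySem.Dict.empty n.toNat n.toNat D (le_refl _)]
  refine congrArg₂ _ rfl (congrArg₂ _ rfl (congrArg₂ _ rfl ?_))
  apply List.map_congr_left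
  intro j hj
  simp only [List.mem_range] at hj
  simp only [show j + 1 ≤ n.toNat from by omega, if_true, Nat.add_sub_cancel]
  rw [splitVals_eq n v hn, PySem.List.getD_map_range _ _ _ _ hj]

-- ---- the effect of one (category, key, value) on B's loop state ----

theorem stepB_aux (n v : Int) (cat k : String) (M : Nat) (S E : Nat → pvDO) :
    ∀ m, m ≤ M →
      (List.range m).foldl
        (fun (acc : List pvDO × List pvDO × Int) (j : Nat) =>
          (acc.1.set j
            (pvIns cat k (if j = 0 then 0 else acc.2.2 + 1) (acc.1.getD j PySem.Dict.empty)),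
           acc.2.1.set j (pvIns cat k
             (acc.2.2 + PySem.Int.floordiv v n +
               (if (j : Int) < PySem.Int.mod v n then 1 else 0))
             (acc.2.1.getD j PySem.Dict.empty)),
           acc.2.2 + PySem.Int.floordiv v n +
             (if (j : Int) < PySem.Int.mod v n then 1 else 0)))
        ((List.range M).map S, (List.range M).map E, 0)
      = ((List.range M).map (fun j =>
            if j < m then pvIns cat k (if j = 0 then 0 else cumF n j v + 1) (S j) else S j),
         (List.range M).map (fun j =>
            if j < m then pvIns cat k (cumF n (j + 1) v) (E j) else E j),
         cumF n m v)
  | 0, _ => by simp [cumF]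
  | (m + 1), hm => by
    rw [List.range_succ, List.foldl_append, stepB_aux n v cat k M S E m (by omega)]
    simp only [List.foldl_cons, List.foldl_nil]
    rw [PySem.List.getD_map_range _ M m _ (by omega),
      PySem.List.getD_map_range _ M m _ (by omega)]
    simp only [lt_irrefl, if_false]
    rw [set_map_range _ M m _ (by omega), set_map_range _ M m _ (by omega)]
    have hcum : cumF n m v + PySem.Int.floordiv v n +
        (if (m : Int) < PySem.Int.mod v n then 1 else 0) = cumF n (m + 1) v := by
      show _ = cumF n m v + svF n m v
      unfold svF
      ring
    rw [hcum]
    refine congrArg₂ _ ?_ (congrArg₂ _ ?_ rfl)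
    · apply List.map_congr_left
      intro j hj
      simp only [List.mem_range] at hj
      by_cases hjm : j = m
      · subst hjm; simp
      · have h1 : (j < m + 1) = (j < m) := by apply propext; omega
        simp [hjm, h1]
    · apply List.map_congr_left
      intro j hj
      simp only [List.mem_range] at hj
      by_cases hjm : j = m
      · subst hjm; simp
      · have h1 : (j < m + 1) = (j < m) := by apply propext; omega
        simp [hjm, h1]

theorem stepKeyB_shape (n : Int) (hn : 1 ≤ n) (cat k : String) (v : Int)
    (S E : Nat → pvDO) :
    pvStepKeyB n cat k v ((List.range n.toNat).map S, (List.range n.toNat).map E) =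
      ((List.range n.toNat).map (fun j =>
          pvIns cat k (if j = 0 then 0 else cumF n j v + 1) (S j)),
       (List.range n.toNat).map (fun j => pvIns cat k (cumF n (j + 1) v) (E j))) := by
  unfold pvStepKeyB
  dsimp only
  rw [show PySem.List.pyRange 0 n 1 = PySem.List.pyRange 0 ((n.toNat : Int)) 1 from by
    congr 1; omega]
  rw [PySem.List.pyRange_one, List.foldl_map]
  have h3 : ((n.toNat : Int) - 0).toNat = n.toNat := by omega
  simp only [h3, zero_add, Int.toNat_natCast, Nat.cast_eq_zero]
  rw [stepB_aux n v cat k n.toNat S E n.toNat (le_refl _)]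
  dsimp only
  refine congrArg₂ _ ?_ ?_
  · apply List.map_congr_left
    intro j hj
    simp only [List.mem_range] at hj
    simp [hj]
  · apply List.map_congr_left
    intro j hj
    simp only [List.mem_range] at hj
    simp [hj]


-- ---- loop invariant shapes ----

def c0f : Int → Int := fun _ => 0
def c1f : Int → Int := fun _ => 1
def sBf (n : Int) (j : Nat) : Int → Int := fun v => if j = 0 then 0 else cumF n j v + 1
def eBf (n : Int) (j : Nat) : Int → Int := fun v => cumF n (j + 1) v

-- state of any one dict mid-category: prefix categories finished, current category partial
def PPA (pref : List (String × List (String × Int))) (cat : String)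
    (done : List (String × Int)) (f : Int → Int) : pvDO :=
  PySem.Dict.mk (mapL f pref ++ [(cat, PySem.Dict.mk (mapI f done))])

theorem mapI_append_singleton (f : Int → Int) (done : List (String × Int)) (k : String) (v : Int) :
    mapI f done ++ [(k, f v)] = mapI f (done ++ [(k, v)]) := by
  simp [mapI]

theorem PPA_ins (pref : List (String × List (String × Int))) (cat : String)
    (done : List (String × Int)) (k : String) (v : Int) (f : Int → Int)
    (hc : cat ∉ pref.map Prod.fst) (hk : k ∉ done.map Prod.fst) :
    pvIns cat k (f v) (PPA pref cat done f) = PPA pref cat (done ++ [(k, v)]) f := by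
  unfold PPA
  rw [pvIns_last _ _ _ _ _ (by rw [keys_mapL]; exact hc) (by rw [keys_mapI]; exact hk),
    mapI_append_singleton]

theorem mO_ins (pref : List (String × List (String × Int))) (cat : String)
    (k : String) (v : Int) (f : Int → Int) (hc : cat ∉ pref.map Prod.fst) :
    pvIns cat k (f v) (mO f pref) = PPA pref cat [(k, v)] f := by
  unfold mO PPA
  rw [pvIns_fresh _ _ _ _ (by rw [keys_mapL]; exact hc)]
  rfl

theorem PPA_mO (pref : List (String × List (String × Int))) (cat : String)
    (sub : List (String × Int)) (f : Int → Int) :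
    PPA pref cat sub f = mO f (pref ++ [(cat, sub)]) := by
  unfold PPA mO mapL
  simp

-- ---- A's main loop ----

theorem loopAKeys (n : Int) (hn : 1 ≤ n) (cat : String) :
    ∀ (ks : List (String × Int)) (pref : List (String × List (String × Int)))
      (done : List (String × Int)),
      cat ∉ pref.map Prod.fst → ((done ++ ks).map Prod.fst).Nodup →
      ks.foldl (fun st kv => pvStepKey n cat kv.1 kv.2 st)
        (PPA pref cat done c0f, PPA pref cat done c1f,
          PPA pref cat done c0f ::
            (List.range n.toNat).map (fun j => PPA pref cat done (fun v => svF n j v)))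
      = (PPA pref cat (done ++ ks) c0f, PPA pref cat (done ++ ks) c1f,
          PPA pref cat (done ++ ks) c0f ::
            (List.range n.toNat).map (fun j => PPA pref cat (done ++ ks) (fun v => svF n j v)))
  | [], pref, done, hc, hnd => by simp
  | (kv :: ks), pref, done, hc, hnd => by
    have hk : kv.1 ∉ done.map Prod.fst := by
      have hnd2 : (done.map Prod.fst ++ (kv :: ks).map Prod.fst).Nodup := by
        simpa using hnd
      intro hmem
      exact (List.disjoint_of_nodup_append hnd2) hmem (by simp)
    rw [List.foldl_cons, stepKeyA_shape n hn cat kv.1 kv.2 _ _ _ _]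
    have e0 : pvIns cat kv.1 0 (PPA pref cat done c0f) = PPA pref cat (done ++ [kv]) c0f := by
      have := PPA_ins pref cat done kv.1 kv.2 c0f hc hk
      simpa [c0f] using this
    have e1 : pvIns cat kv.1 1 (PPA pref cat done c1f) = PPA pref cat (done ++ [kv]) c1f := by
      have := PPA_ins pref cat done kv.1 kv.2 c1f hc hk
      simpa [c1f] using this
    have e2 : (List.range n.toNat).map
        (fun j => pvIns cat kv.1 (svF n j kv.2) (PPA pref cat done (fun v => svF n j v)))
        = (List.range n.toNat).map (fun j => PPA pref cat (done ++ [kv]) (fun v => svF n j v)) := by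
      apply List.map_congr_left
      intro j _
      exact PPA_ins pref cat done kv.1 kv.2 (fun v => svF n j v) hc hk
    rw [e0, e1, e2]
    have hnd' : (((done ++ [kv]) ++ ks).map Prod.fst).Nodup := by
      simpa [List.append_assoc] using hnd
    have := loopAKeys n hn cat ks pref (done ++ [kv]) hc hnd'
    rw [this]
    simp [List.append_assoc]

theorem loopACats (n : Int) (hn : 1 ≤ n) :
    ∀ (rem pref : List (String × List (String × Int))),
      ((pref ++ rem).map Prod.fst).Nodup →
      (∀ c ∈ rem, c.2 ≠ [] ∧ (c.2.map Prod.fst).Nodup) →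
      rem.foldl (fun st cs => cs.2.foldl (fun st kv => pvStepKey n cs.1 kv.1 kv.2 st) st)
        (mO c0f pref, mO c1f pref,
          mO c0f pref :: (List.range n.toNat).map (fun j => mO (fun v => svF n j v) pref))
      = (mO c0f (pref ++ rem), mO c1f (pref ++ rem),
          mO c0f (pref ++ rem) ::
            (List.range n.toNat).map (fun j => mO (fun v => svF n j v) (pref ++ rem)))
  | [], pref, _, _ => by simp
  | ((cat, sub) :: rest), pref, hnd, hsub => by
    obtain ⟨hne, hknd⟩ := hsub (cat, sub) (by simp)
    obtain ⟨kv0, ks, rfl⟩ : ∃ kv0 ks, sub = kv0 :: ks := by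
      cases sub with
      | nil => exact absurd rfl hne
      | cons a l => exact ⟨a, l, rfl⟩
    have hc : cat ∉ pref.map Prod.fst := by
      have h1 : ((pref ++ (cat, kv0 :: ks) :: rest).map Prod.fst) =
          pref.map Prod.fst ++ cat :: rest.map Prod.fst := by simp
      rw [h1] at hnd
      intro hmem
      exact (List.disjoint_of_nodup_append hnd) hmem (by simp)
    rw [List.foldl_cons]
    have step1 : (kv0 :: ks).foldl (fun st kv => pvStepKey n cat kv.1 kv.2 st)
        (mO c0f pref, mO c1f pref,
          mO c0f pref :: (List.range n.toNat).map (fun j => mO (fun v => svF n j v) pref))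
        = (PPA pref cat (kv0 :: ks) c0f, PPA pref cat (kv0 :: ks) c1f,
            PPA pref cat (kv0 :: ks) c0f ::
              (List.range n.toNat).map (fun j => PPA pref cat (kv0 :: ks) (fun v => svF n j v))) := by
      rw [List.foldl_cons, stepKeyA_shape n hn cat kv0.1 kv0.2 _ _ _ _]
      have e0 : pvIns cat kv0.1 0 (mO c0f pref) = PPA pref cat [kv0] c0f := by
        have := mO_ins pref cat kv0.1 kv0.2 c0f hc
        simpa [c0f] using this
      have e1 : pvIns cat kv0.1 1 (mO c1f pref) = PPA pref cat [kv0] c1f := by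
        have := mO_ins pref cat kv0.1 kv0.2 c1f hc
        simpa [c1f] using this
      have e2 : (List.range n.toNat).map
          (fun j => pvIns cat kv0.1 (svF n j kv0.2) (mO (fun v => svF n j v) pref))
          = (List.range n.toNat).map (fun j => PPA pref cat [kv0] (fun v => svF n j v)) := by
        apply List.map_congr_left
        intro j _
        exact mO_ins pref cat kv0.1 kv0.2 (fun v => svF n j v) hc
      rw [e0, e1, e2]
      exact loopAKeys n hn cat ks pref [kv0] hc (by simpa using hknd)
    rw [step1]
    simp only [PPA_mO]
    have hnd' : (((pref ++ [(cat, kv0 :: ks)]) ++ rest).map Prod.fst).Nodup := by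
      simpa [List.append_assoc] using hnd
    have := loopACats n hn rest (pref ++ [(cat, kv0 :: ks)]) hnd'
      (fun c hcm => hsub c (by simp [hcm]))
    rw [this]
    simp [List.append_assoc]

-- ---- B's main loop ----

theorem loopBKeys (n : Int) (hn : 1 ≤ n) (cat : String) :
    ∀ (ks : List (String × Int)) (pref : List (String × List (String × Int)))
      (done : List (String × Int)),
      cat ∉ pref.map Prod.fst → ((done ++ ks).map Prod.fst).Nodup →
      ks.foldl (fun st kv => pvStepKeyB n cat kv.1 kv.2 st)
        ((List.range n.toNat).map (fun j => PPA pref cat done (sBf n j)),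
         (List.range n.toNat).map (fun j => PPA pref cat done (eBf n j)))
      = ((List.range n.toNat).map (fun j => PPA pref cat (done ++ ks) (sBf n j)),
         (List.range n.toNat).map (fun j => PPA pref cat (done ++ ks) (eBf n j)))
  | [], pref, done, hc, hnd => by simp
  | (kv :: ks), pref, done, hc, hnd => by
    have hk : kv.1 ∉ done.map Prod.fst := by
      have hnd2 : (done.map Prod.fst ++ (kv :: ks).map Prod.fst).Nodup := by
        simpa using hnd
      intro hmem
      exact (List.disjoint_of_nodup_append hnd2) hmem (by simp)
    rw [List.foldl_cons, stepKeyB_shape n hn cat kv.1 kv.2 _ _]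
    have e1 : (List.range n.toNat).map
        (fun j => pvIns cat kv.1 (if j = 0 then 0 else cumF n j kv.2 + 1)
          (PPA pref cat done (sBf n j)))
        = (List.range n.toNat).map (fun j => PPA pref cat (done ++ [kv]) (sBf n j)) := by
      apply List.map_congr_left
      intro j _
      exact PPA_ins pref cat done kv.1 kv.2 (sBf n j) hc hk
    have e2 : (List.range n.toNat).map
        (fun j => pvIns cat kv.1 (cumF n (j + 1) kv.2) (PPA pref cat done (eBf n j)))
        = (List.range n.toNat).map (fun j => PPA pref cat (done ++ [kv]) (eBf n j)) := by
      apply List.map_congr_left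
      intro j _
      exact PPA_ins pref cat done kv.1 kv.2 (eBf n j) hc hk
    rw [e1, e2]
    have hnd' : (((done ++ [kv]) ++ ks).map Prod.fst).Nodup := by
      simpa [List.append_assoc] using hnd
    have := loopBKeys n hn cat ks pref (done ++ [kv]) hc hnd'
    rw [this]
    simp [List.append_assoc]

theorem loopBCats (n : Int) (hn : 1 ≤ n) :
    ∀ (rem pref : List (String × List (String × Int))),
      ((pref ++ rem).map Prod.fst).Nodup →
      (∀ c ∈ rem, c.2 ≠ [] ∧ (c.2.map Prod.fst).Nodup) →
      rem.foldl (fun st cs => cs.2.foldl (fun st kv => pvStepKeyB n cs.1 kv.1 kv.2 st) st)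
        ((List.range n.toNat).map (fun j => mO (sBf n j) pref),
         (List.range n.toNat).map (fun j => mO (eBf n j) pref))
      = ((List.range n.toNat).map (fun j => mO (sBf n j) (pref ++ rem)),
         (List.range n.toNat).map (fun j => mO (eBf n j) (pref ++ rem)))
  | [], pref, _, _ => by simp
  | ((cat, sub) :: rest), pref, hnd, hsub => by
    obtain ⟨hne, hknd⟩ := hsub (cat, sub) (by simp)
    obtain ⟨kv0, ks, rfl⟩ : ∃ kv0 ks, sub = kv0 :: ks := by
      cases sub with
      | nil => exact absurd rfl hne
      | cons a l => exact ⟨a, l, rfl⟩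
    have hc : cat ∉ pref.map Prod.fst := by
      have h1 : ((pref ++ (cat, kv0 :: ks) :: rest).map Prod.fst) =
          pref.map Prod.fst ++ cat :: rest.map Prod.fst := by simp
      rw [h1] at hnd
      intro hmem
      exact (List.disjoint_of_nodup_append hnd) hmem (by simp)
    rw [List.foldl_cons]
    have step1 : (kv0 :: ks).foldl (fun st kv => pvStepKeyB n cat kv.1 kv.2 st)
        ((List.range n.toNat).map (fun j => mO (sBf n j) pref),
         (List.range n.toNat).map (fun j => mO (eBf n j) pref))
        = ((List.range n.toNat).map (fun j => PPA pref cat (kv0 :: ks) (sBf n j)),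
           (List.range n.toNat).map (fun j => PPA pref cat (kv0 :: ks) (eBf n j))) := by
      rw [List.foldl_cons, stepKeyB_shape n hn cat kv0.1 kv0.2 _ _]
      have e1 : (List.range n.toNat).map
          (fun j => pvIns cat kv0.1 (if j = 0 then 0 else cumF n j kv0.2 + 1)
            (mO (sBf n j) pref))
          = (List.range n.toNat).map (fun j => PPA pref cat [kv0] (sBf n j)) := by
        apply List.map_congr_left
        intro j _
        exact mO_ins pref cat kv0.1 kv0.2 (sBf n j) hc
      have e2 : (List.range n.toNat).map
          (fun j => pvIns cat kv0.1 (cumF n (j + 1) kv0.2) (mO (eBf n j) pref))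
          = (List.range n.toNat).map (fun j => PPA pref cat [kv0] (eBf n j)) := by
        apply List.map_congr_left
        intro j _
        exact mO_ins pref cat kv0.1 kv0.2 (eBf n j) hc
      rw [e1, e2]
      exact loopBKeys n hn cat ks pref [kv0] hc (by simpa using hknd)
    rw [step1]
    simp only [PPA_mO]
    have hnd' : (((pref ++ [(cat, kv0 :: ks)]) ++ rest).map Prod.fst).Nodup := by
      simpa [List.append_assoc] using hnd
    have := loopBCats n hn rest (pref ++ [(cat, kv0 :: ks)]) hnd'
      (fun c hcm => hsub c (by simp [hcm]))
    rw [this]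
    simp [List.append_assoc]


-- ---- add_dictionaries on the canonical shapes ----

theorem keys_mk_mapI (f : Int → Int) (sub : List (String × Int)) :
    (PySem.Dict.mk (mapI f sub)).keys = sub.map Prod.fst := by
  simp only [PySem.Dict.keys, PySem.Dict.items]
  exact keys_mapI f sub

theorem getD_mk_mapI (f : Int → Int) (sub : List (String × Int)) (k : String) (v : Int)
    (d : Int) (hmem : (k, v) ∈ sub) (hnd : (sub.map Prod.fst).Nodup) :
    (PySem.Dict.mk (mapI f sub)).getD k d = f v := by
  apply PySem.Dict.getD_of_mem_items
  · show (k, f v) ∈ mapI f sub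
    exact List.mem_map.mpr ⟨(k, v), hmem, rfl⟩
  · rw [keys_mk_mapI]; exact hnd

theorem addInner_shape (f g : Int → Int) (sub : List (String × Int))
    (hnd : (sub.map Prod.fst).Nodup) :
    pvAddInner (PySem.Dict.mk (mapI f sub)) (PySem.Dict.mk (mapI g sub)) =
      PySem.Dict.mk (mapI (fun v => f v + g v) sub) := by
  unfold pvAddInner
  rw [PySem.List.foldl_congr_mem _ _
    (fun r (kv : String × Int) =>
      r.insert kv.1 (kv.2 + (PySem.Dict.mk (mapI g sub)).getD kv.1 0)) _
    (by
      intro acc kv hkv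
      have hkv2 : kv ∈ mapI f sub := hkv
      have hmemk : kv.1 ∈ (mapI g sub).map Prod.fst := by
        rw [keys_mapI]
        rcases List.mem_map.mp hkv2 with ⟨p, hp, rfl⟩
        exact List.mem_map.mpr ⟨p, hp, rfl⟩
      simp [contains_mk_true _ _ hmemk])]
  apply PySem.Dict.ext
  rw [PySem.Dict.items_foldl_insert_fresh (mapI f sub) Prod.fst
    (fun kv => kv.2 + (PySem.Dict.mk (mapI g sub)).getD kv.1 0) PySem.Dict.empty
    (fun a _ => PySem.Dict.contains_empty _)
    (by rw [keys_mapI]; exact hnd)]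
  show [] ++ _ = _
  rw [List.nil_append]
  rw [show mapI f sub = sub.map (fun kv => (kv.1, f kv.2)) from rfl, List.map_map]
  rw [show mapI (fun v => f v + g v) sub = sub.map (fun kv => (kv.1, f kv.2 + g kv.2)) from rfl]
  apply List.map_congr_left
  intro kv hkv
  simp only [Function.comp_apply]
  rw [getD_mk_mapI g sub kv.1 kv.2 0 (by simpa using hkv) hnd]

theorem keys_mO (f : Int → Int) (orig : List (String × List (String × Int))) :
    (mO f orig).keys = orig.map Prod.fst := by
  simp only [mO, PySem.Dict.keys, PySem.Dict.items]
  exact keys_mapL f orig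

theorem getD_mO (f : Int → Int) (orig : List (String × List (String × Int)))
    (c : String × List (String × Int)) (d : pvDI) (hmem : c ∈ orig)
    (hc : (orig.map Prod.fst).Nodup) :
    (mO f orig).getD c.1 d = PySem.Dict.mk (mapI f c.2) := by
  apply PySem.Dict.getD_of_mem_items
  · show (c.1, PySem.Dict.mk (mapI f c.2)) ∈ mapL f orig
    exact List.mem_map.mpr ⟨c, hmem, rfl⟩
  · rw [keys_mO]; exact hc

theorem addOuter_shape (f g : Int → Int) (orig : List (String × List (String × Int)))
    (hc : (orig.map Prod.fst).Nodup)
    (hin : ∀ c ∈ orig, (c.2.map Prod.fst).Nodup) :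
    pvAddOuter (mO f orig) (mO g orig) = mO (fun v => f v + g v) orig := by
  unfold pvAddOuter
  rw [show (mO f orig).items = mapL f orig from rfl]
  rw [PySem.List.foldl_congr_mem _ _
    (fun r (kv : String × pvDI) =>
      r.insert kv.1 (pvAddInner kv.2 ((mO g orig).getD kv.1 PySem.Dict.empty))) _
    (by
      intro acc kv hkv
      have hmemk : kv.1 ∈ (mapL g orig).map Prod.fst := by
        rw [keys_mapL, ← keys_mapL f]
        exact List.mem_map.mpr ⟨kv, hkv, rfl⟩
      simp [show (mO g orig).contains kv.1 = true from contains_mk_true _ _ hmemk])]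
  apply PySem.Dict.ext
  rw [PySem.Dict.items_foldl_insert_fresh (mapL f orig) Prod.fst
    (fun kv => pvAddInner kv.2 ((mO g orig).getD kv.1 PySem.Dict.empty)) PySem.Dict.empty
    (fun a _ => PySem.Dict.contains_empty _)
    (by rw [keys_mapL]; exact hc)]
  show [] ++ _ = _
  rw [List.nil_append]
  rw [show mapL f orig = orig.map (fun c => (c.1, PySem.Dict.mk (mapI f c.2))) from rfl,
    List.map_map]
  rw [show (mO (fun v => f v + g v) orig).items =
    orig.map (fun c => (c.1, PySem.Dict.mk (mapI (fun v => f v + g v) c.2))) from rfl]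
  apply List.map_congr_left
  intro c hcm
  simp only [Function.comp_apply]
  rw [getD_mO g orig c PySem.Dict.empty hcm hc, addInner_shape f g c.2 (hin c hcm)]

-- ---- Python's dict == is true on the reconstructed original ----

theorem pvDictEqI_refl (sub : List (String × Int)) (hnd : (sub.map Prod.fst).Nodup) :
    pvDictEqI (PySem.Dict.mk sub) (PySem.Dict.mk sub) = true := by
  unfold pvDictEqI
  rw [Bool.and_eq_true]
  constructor
  · exact beq_self_eq_true _
  · rw [List.all_eq_true]
    intro kv hkv
    rw [PySem.Dict.get?_of_mem_items _ (by simpa using hkv) (by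
      simpa [PySem.Dict.keys] using hnd)]
    exact beq_self_eq_true _

theorem pvDictEqO_refl (orig : List (String × List (String × Int)))
    (hc : (orig.map Prod.fst).Nodup)
    (hin : ∀ c ∈ orig, (c.2.map Prod.fst).Nodup) :
    pvDictEqO (PySem.Dict.mk (orig.map (fun c => (c.1, PySem.Dict.mk c.2))))
      (PySem.Dict.mk (orig.map (fun c => (c.1, PySem.Dict.mk c.2)))) = true := by
  unfold pvDictEqO
  rw [Bool.and_eq_true]
  constructor
  · exact beq_self_eq_true _
  · rw [List.all_eq_true]
    intro kv hkv
    have hkv' := hkv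
    rw [show (PySem.Dict.mk (orig.map (fun c => (c.1, PySem.Dict.mk c.2)))).items =
      orig.map (fun c => (c.1, PySem.Dict.mk c.2)) from rfl] at hkv'
    rcases List.mem_map.mp hkv' with ⟨c, hcm, rfl⟩
    rw [PySem.Dict.get?_of_mem_items _ hkv (by
      simpa [PySem.Dict.keys, List.map_map, Function.comp_def] using hc)]
    exact pvDictEqI_refl c.2 (hin c hcm)

-- ---- the cumulative pass ----

theorem cumAux (n : Int) (orig : List (String × List (String × Int))) (hn : 1 ≤ n)
    (hc : (orig.map Prod.fst).Nodup) (hin : ∀ c ∈ orig, (c.2.map Prod.fst).Nodup) :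
    ∀ t, t ≤ n.toNat →
      (List.range t).foldl
        (fun o k => o.set (k + 1)
          (pvAddOuter (o.getD (k + 1 - 1) PySem.Dict.empty) (o.getD (k + 1) PySem.Dict.empty)))
        (mO c0f orig :: (List.range n.toNat).map (fun j => mO (fun v => svF n j v) orig))
      = mO c0f orig :: (List.range n.toNat).map (fun j =>
          if j + 1 ≤ t then mO (fun v => cumF n (j + 1) v) orig
          else mO (fun v => svF n j v) orig)
  | 0, _ => by simp
  | (t + 1), ht => by
    rw [List.range_succ, List.foldl_append, cumAux n orig hn hc hin t (by omega)]
    simp only [List.foldl_cons, List.foldl_nil, Nat.add_sub_cancel]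
    have hread1 : (mO c0f orig :: (List.range n.toNat).map (fun j =>
        if j + 1 ≤ t then mO (fun v => cumF n (j + 1) v) orig
        else mO (fun v => svF n j v) orig)).getD t PySem.Dict.empty
        = mO (fun v => cumF n t v) orig := by
      cases t with
      | zero =>
        rw [List.getD_cons_zero]
        rfl
      | succ s =>
        rw [List.getD_cons_succ, PySem.List.getD_map_range _ _ _ _ (by omega)]
        simp only [show s + 1 ≤ s + 1 from le_refl _, if_true]
    have hread2 : (mO c0f orig :: (List.range n.toNat).map (fun j =>
        if j + 1 ≤ t then mO (fun v => cumF n (j + 1) v) orig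
        else mO (fun v => svF n j v) orig)).getD (t + 1) PySem.Dict.empty
        = mO (fun v => svF n t v) orig := by
      rw [List.getD_cons_succ, PySem.List.getD_map_range _ _ _ _ (by omega)]
      simp only [show ¬ (t + 1 ≤ t) from by omega, if_false]
    rw [hread1, hread2, addOuter_shape _ _ orig hc hin]
    rw [List.set_cons_succ, set_map_range _ _ _ _ (by omega)]
    congr 1
    apply List.map_congr_left
    intro j hj
    simp only [List.mem_range] at hj
    by_cases hjt : j = t
    · subst hjt
      simp only [if_pos rfl, show j + 1 ≤ j + 1 from le_refl _, if_true]
      rfl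
    · have h1 : (j + 1 ≤ t + 1) = (j + 1 ≤ t) := by apply propext; omega
      simp [hjt, h1]

-- ---- closed form of the prefix sums ----

theorem cumF_closed (n v : Int) (hn : 1 ≤ n) :
    ∀ t : Nat, cumF n t v =
      (t : Int) * PySem.Int.floordiv v n + min (t : Int) (PySem.Int.mod v n)
  | 0 => by
    obtain ⟨hr0, hrn⟩ := mod_bounds n v hn
    simp only [cumF, Nat.cast_zero, zero_mul, zero_add]
    omega
  | (t + 1) => by
    obtain ⟨hr0, hrn⟩ := mod_bounds n v hn
    rw [show cumF n (t + 1) v = cumF n t v + svF n t v from rfl,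
      cumF_closed n v hn t]
    unfold svF
    push_cast
    by_cases h : (t : Int) < PySem.Int.mod v n
    · rw [if_pos h]
      have h1 : min (t : Int) (PySem.Int.mod v n) = t := by omega
      have h2 : min ((t : Int) + 1) (PySem.Int.mod v n) = (t : Int) + 1 := by omega
      rw [h1, h2]; ring
    · rw [if_neg h]
      have h1 : min (t : Int) (PySem.Int.mod v n) = PySem.Int.mod v n := by omega
      have h2 : min ((t : Int) + 1) (PySem.Int.mod v n) = PySem.Int.mod v n := by omega
      rw [h1, h2]; ring

theorem cumF_total (n v : Int) (hn : 1 ≤ n) : cumF n n.toNat v = v := by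
  obtain ⟨hr0, hrn⟩ := mod_bounds n v hn
  rw [cumF_closed n v hn n.toNat]
  have h1 : ((n.toNat : Int)) = n := by omega
  rw [h1, min_eq_right (le_of_lt hrn)]
  have h2 := PySem.Int.floordiv_mul_add_mod v n
  calc n * PySem.Int.floordiv v n + PySem.Int.mod v n
      = PySem.Int.floordiv v n * n + PySem.Int.mod v n := by ring
    _ = v := h2

theorem mO_total (n : Int) (orig : List (String × List (String × Int))) (hn : 1 ≤ n) :
    mO (fun v => cumF n n.toNat v) orig =
      PySem.Dict.mk (orig.map (fun c => (c.1, PySem.Dict.mk c.2))) := by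
  unfold mO mapL
  apply congrArg PySem.Dict.mk
  apply List.map_congr_left
  intro c _
  have h2 : mapI (fun v => cumF n n.toNat v) c.2 = c.2 := by
    unfold mapI
    conv_rhs => rw [show c.2 = c.2.map (fun kv => (kv.1, kv.2)) from by simp]
    apply List.map_congr_left
    intro kv _
    show (kv.1, cumF n n.toNat kv.2) = (kv.1, kv.2)
    rw [cumF_total n kv.2 hn]
  rw [h2]


-- ---- the two programs, reduced to closed form ----

theorem Bside (orig : List (String × List (String × Int))) (n : Int) (hn : 1 ≤ n)
    (hc : (orig.map Prod.fst).Nodup)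
    (hsub : ∀ c ∈ orig, c.2 ≠ [] ∧ (c.2.map Prod.fst).Nodup) :
    split_dictionary_alt orig n =
      (((List.range n.toNat).map (fun j => mO (sBf n j) orig)).map pvToPlain,
       ((List.range n.toNat).map (fun j => mO (eBf n j) orig)).map pvToPlain) := by
  simp only [split_dictionary_alt]
  have hinitS : (PySem.List.pyRange 0 n 1).map (fun _ => (PySem.Dict.empty : pvDO)) =
      (List.range n.toNat).map
        (fun j => mO (sBf n j) ([] : List (String × List (String × Int)))) := by
    rw [PySem.List.pyRange_one, List.map_map,
      show ((n : Int) - 0).toNat = n.toNat from by omega]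
    rfl
  have hinitE : (PySem.List.pyRange 0 n 1).map (fun _ => (PySem.Dict.empty : pvDO)) =
      (List.range n.toNat).map
        (fun j => mO (eBf n j) ([] : List (String × List (String × Int)))) := by
    rw [PySem.List.pyRange_one, List.map_map,
      show ((n : Int) - 0).toNat = n.toNat from by omega]
    rfl
  rw [show ((PySem.List.pyRange 0 n 1).map (fun _ => (PySem.Dict.empty : pvDO)),
      (PySem.List.pyRange 0 n 1).map (fun _ => (PySem.Dict.empty : pvDO))) =
      ((List.range n.toNat).map
        (fun j => mO (sBf n j) ([] : List (String × List (String × Int)))),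
       (List.range n.toNat).map
        (fun j => mO (eBf n j) ([] : List (String × List (String × Int)))))
    from congrArg₂ Prod.mk hinitS hinitE]
  rw [loopBCats n hn orig [] (by simpa using hc) hsub]
  simp only [List.nil_append]

theorem Aside (orig : List (String × List (String × Int))) (n : Int) (hn : 1 ≤ n)
    (hc : (orig.map Prod.fst).Nodup)
    (hsub : ∀ c ∈ orig, c.2 ≠ [] ∧ (c.2.map Prod.fst).Nodup) :
    split_dictionary orig n =
      ((mO c0f orig :: (List.range (n.toNat - 1)).map
          (fun j => mO (fun v => cumF n (j + 1) v + 1) orig)).map pvToPlain,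
       ((List.range n.toNat).map (fun j => mO (fun v => cumF n (j + 1) v) orig)).map pvToPlain) := by
  have hin : ∀ c ∈ orig, (c.2.map Prod.fst).Nodup := fun c hc2 => (hsub c hc2).2
  simp only [split_dictionary]
  have hinit : (PySem.List.pyRange 0 (n + 1) 1).map (fun _ => (PySem.Dict.empty : pvDO)) =
      mO c0f ([] : List (String × List (String × Int))) ::
        (List.range n.toNat).map
          (fun j => mO (fun v => svF n j v) ([] : List (String × List (String × Int)))) := by
    rw [PySem.List.pyRange_one, List.map_map,
      show ((n + 1 : Int) - 0).toNat = n.toNat + 1 from by omega,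
      List.range_succ_eq_map]
    simp only [List.map_cons, List.map_map]
    rfl
  rw [show ((PySem.Dict.empty : pvDO), (PySem.Dict.empty : pvDO),
      (PySem.List.pyRange 0 (n + 1) 1).map (fun _ => (PySem.Dict.empty : pvDO))) =
      (mO c0f ([] : List (String × List (String × Int))),
       mO c1f ([] : List (String × List (String × Int))),
       mO c0f ([] : List (String × List (String × Int))) ::
         (List.range n.toNat).map
           (fun j => mO (fun v => svF n j v) ([] : List (String × List (String × Int)))))
    from by rw [hinit]; rfl]
  rw [loopACats n hn orig [] (by simpa using hc) hsub]
  simp only [List.nil_append]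
  have hcum : (PySem.List.pyRange 1 (n + 1) 1).foldl
      (fun o i => o.set i.toNat
        (pvAddOuter (o.getD (i.toNat - 1) PySem.Dict.empty) (o.getD i.toNat PySem.Dict.empty)))
      (mO c0f orig :: (List.range n.toNat).map (fun j => mO (fun v => svF n j v) orig))
      = mO c0f orig ::
          (List.range n.toNat).map (fun j => mO (fun v => cumF n (j + 1) v) orig) := by
    rw [show (n + 1 : Int) = 1 + (n.toNat : Int) from by omega, PySem.List.pyRange_one,
      show ((1 + (n.toNat : Int)) - 1).toNat = n.toNat from by omega, List.foldl_map]
    simp only [show ∀ k : Nat, ((1 : Int) + (k : Int)).toNat = k + 1 from fun k => by omega]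
    rw [cumAux n orig hn hc hin n.toNat (le_refl _)]
    congr 1
    apply List.map_congr_left
    intro j hj
    simp only [List.mem_range] at hj
    simp [show j + 1 ≤ n.toNat from by omega]
  rw [hcum, PySem.List.slice_to_neg_one, PySem.List.slice_from_one]
  have hdrop : (mO c0f orig ::
      (List.range n.toNat).map (fun j => mO (fun v => cumF n (j + 1) v) orig)).dropLast
      = mO c0f orig :: (List.range (n.toNat - 1)).map
          (fun j => mO (fun v => cumF n (j + 1) v) orig) := by
    conv_lhs => rw [show n.toNat = (n.toNat - 1) + 1 from by omega, List.range_succ,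
      List.map_append]
    simp only [List.map_cons, List.map_nil]
    rw [show mO c0f orig ::
        ((List.range (n.toNat - 1)).map (fun j => mO (fun v => cumF n (j + 1) v) orig) ++
          [mO (fun v => cumF n ((n.toNat - 1) + 1) v) orig]) =
        (mO c0f orig :: (List.range (n.toNat - 1)).map
          (fun j => mO (fun v => cumF n (j + 1) v) orig)) ++
          [mO (fun v => cumF n ((n.toNat - 1) + 1) v) orig] from rfl]
    rw [List.dropLast_concat]
  rw [hdrop, List.tail_cons]
  have hstart := foldl_pyRange_set (fun _ d => pvAddOuter d (mO c1f orig)) (mO c0f orig)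
    PySem.Dict.empty (n.toNat - 1) (n.toNat - 1)
    (fun j => mO (fun v => cumF n (j + 1) v) orig) (le_refl _)
  rw [show (1 + ((n.toNat - 1 : Nat) : Int)) = n from by omega] at hstart
  rw [hstart]
  have hval : (mO c0f orig ::
      (List.range n.toNat).map (fun j => mO (fun v => cumF n (j + 1) v) orig)).getD
      n.toNat PySem.Dict.empty = mO (fun v => cumF n n.toNat v) orig := by
    conv_lhs => rw [show n.toNat = (n.toNat - 1) + 1 from by omega]
    rw [List.getD_cons_succ, PySem.List.getD_map_range _ _ _ _ (by omega)]
    rw [show (n.toNat - 1) + 1 = n.toNat from by omega]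
  rw [hval, mO_total n orig hn, pvDictEqO_refl orig hc hin]
  simp only [if_true]
  refine congrArg₂ Prod.mk ?_ rfl
  refine congrArg (List.map pvToPlain) ?_
  refine congrArg₂ List.cons rfl ?_
  apply List.map_congr_left
  intro j hj
  simp only [List.mem_range] at hj
  rw [if_pos (by omega : j + 1 ≤ n.toNat - 1)]
  rw [addOuter_shape (fun v => cumF n (j + 1) v) c1f orig hc hin]
  rfl

-- ---- the verdict ----

theorem main_eq (orig : List (String × List (String × Int))) (n : Int)
    (hpre : Pre_split_dictionary orig n) :
    split_dictionary orig n = split_dictionary_alt orig n := by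
  obtain ⟨⟨hc, hsub⟩, hcase⟩ := hpre
  by_cases hn : 1 ≤ n
  · rw [Aside orig n hn hc hsub, Bside orig n hn hc hsub]
    refine congrArg₂ Prod.mk ?_ rfl
    refine congrArg (List.map pvToPlain) ?_
    conv_rhs => rw [show n.toNat = (n.toNat - 1) + 1 from by omega, List.range_succ_eq_map]
    simp only [List.map_cons, List.map_map]
    rfl
  · have h0 : orig = [] ∧ 0 ≤ n := by
      rcases hcase with h1 | h2
      · exact absurd h1 hn
      · exact h2
    obtain ⟨horig, hn0⟩ := h0
    have hzero : n = 0 := by omega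
    subst horig hzero
    rfl
-- ===== VERDICT (by name: the statement is the Claim_ definition above) =====
theorem split_dictionary_spec : Claim_equal_split_dictionary := by
  intro orig n _ hpre
  unfold Spec_split_dictionary
  exact main_eq orig n hpre
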